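-- pv_equiv track=rewrite | github.com/RobbeW/Data_Statistiek_R | Deel 3 Algoritmiek/03 Hogere dimensie/Evaluatie/27 Vallende appels/solution/solution.nl.py | appels
-- ===== SOURCE A (Python) =====
-- def appels(rooster):
--     n_rows = len(rooster)
--     n_cols = len(rooster[0])
--
--     # aantal appels en grond tellen per kolom
--     aantal_appels = []
--     aantal_grond = []
--     for c in range(n_cols):
--         tela = 0
--         telg = 0
--         for r in range(n_rows):
--             el = rooster[r][c]
--             if el == "a":
--                 tela += 1
--             elif el == "#":
--                 telg += 1
--         aantal_appels.append(tela)
--         aantal_grond.append(telg)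
--
--     # nieuw rooster maken
--     nieuw = []
--     for r in range(n_rows):
--         rij = []
--         for c in range(n_cols):
--             rij.append(" ")
--         nieuw.append(rij)
--
--     # opvullen met grond en appels, van onder naar boven
--     for c in range(n_cols):
--         telg = aantal_grond[c]
--         tela = aantal_appels[c]
--         for r in range(telg + tela):
--             if r < telg:
--                 el = "#"
--             else:
--                 el = "a"
--             nieuw[n_rows - 1 - r][c] = el
--
--     return nieuw
-- ===== SOURCE B (Python) =====
-- def appels(rooster):
--     n_rows = len(rooster)
--     n_cols = len(rooster[0])
--     kolommen = []
--     for c in range(n_cols):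
--         kolom = [rij[c] for rij in rooster]
--         tela = kolom.count("a")
--         telg = kolom.count("#")
--         kolommen.append([" "] * (n_rows - tela - telg) + ["a"] * tela + ["#"] * telg)
--     return [[kolommen[c][r] for c in range(n_cols)] for r in range(n_rows)]
-- ===== Notes on version B (the rewrite author's own statement) =====
-- stated objective: simpler
-- what changed: Instead of allocating a full grid of spaces and mutating it bottom-up per column in a second pass, B builds each settled column directly as spaces+apples+dirt via list repetition and transposes the columns into rows with a comprehension.
import Mathlib
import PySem

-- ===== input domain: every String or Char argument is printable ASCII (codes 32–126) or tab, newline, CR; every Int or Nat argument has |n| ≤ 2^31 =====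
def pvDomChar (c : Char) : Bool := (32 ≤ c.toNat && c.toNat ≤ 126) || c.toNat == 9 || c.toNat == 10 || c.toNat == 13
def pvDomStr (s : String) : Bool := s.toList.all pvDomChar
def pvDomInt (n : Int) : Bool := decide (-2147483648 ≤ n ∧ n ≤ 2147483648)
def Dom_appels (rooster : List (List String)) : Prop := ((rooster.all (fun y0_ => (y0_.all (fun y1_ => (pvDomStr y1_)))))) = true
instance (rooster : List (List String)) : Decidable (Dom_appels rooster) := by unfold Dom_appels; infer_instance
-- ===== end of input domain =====

-- B builds each settled column directly as spaces++apples++dirt and transposes it into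
-- rows, instead of A's mutate-a-grid-of-spaces second pass (objective: simpler).
-- ===== PORT A =====
def appels (rooster : List (List String)) : List (List String) :=
  let n_rows : Int := PySem.List.len rooster
  let n_cols : Int := PySem.List.len (PySem.List.pyGetD rooster 0 [])
  -- aantal appels en grond tellen per kolom
  let counts : List Int × List Int :=
    (PySem.List.pyRange 0 n_cols 1).foldl (fun (acc : List Int × List Int) c =>
      let t : Int × Int :=
        (PySem.List.pyRange 0 n_rows 1).foldl (fun (t : Int × Int) r =>
          let el := PySem.List.pyGetD (PySem.List.pyGetD rooster r []) c ""
          if el = "a" then (t.1 + 1, t.2)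
          else if el = "#" then (t.1, t.2 + 1)
          else t) (0, 0)
      (acc.1 ++ [t.1], acc.2 ++ [t.2])) ([], [])
  let aantal_appels := counts.1
  let aantal_grond := counts.2
  -- nieuw rooster maken
  let nieuw0 : List (List String) :=
    (PySem.List.pyRange 0 n_rows 1).foldl (fun nw _r =>
      nw ++ [(PySem.List.pyRange 0 n_cols 1).foldl (fun rij _c => rij ++ [" "]) []]) []
  -- opvullen met grond en appels, van onder naar boven
  (PySem.List.pyRange 0 n_cols 1).foldl (fun nw c =>
    let telg := PySem.List.pyGetD aantal_grond c 0
    let tela := PySem.List.pyGetD aantal_appels c 0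
    (PySem.List.pyRange 0 (telg + tela) 1).foldl (fun nw2 r =>
      let el := if r < telg then "#" else "a"
      PySem.List.pySetD nw2 (n_rows - 1 - r)
        (PySem.List.pySetD (PySem.List.pyGetD nw2 (n_rows - 1 - r) []) c el)) nw) nieuw0

-- ===== PORT B =====
def appels_alt (rooster : List (List String)) : List (List String) :=
  let n_rows : Int := PySem.List.len rooster
  let n_cols : Int := PySem.List.len (PySem.List.pyGetD rooster 0 [])
  let kolommen : List (List String) :=
    (PySem.List.pyRange 0 n_cols 1).map (fun c =>
      let kolom := rooster.map (fun rij => PySem.List.pyGetD rij c "")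
      let tela : Int := PySem.List.count kolom "a"
      let telg : Int := PySem.List.count kolom "#"
      List.replicate (n_rows - tela - telg).toNat " " ++
        List.replicate tela.toNat "a" ++ List.replicate telg.toNat "#")
  (PySem.List.pyRange 0 n_rows 1).map (fun r =>
    (PySem.List.pyRange 0 n_cols 1).map (fun c =>
      PySem.List.pyGetD (PySem.List.pyGetD kolommen c []) r " "))

-- ===== PRECONDITION & SPEC =====
-- Pre_ excludes exactly the inputs where Python A raises an IndexError: the empty grid
-- (rooster[0]) and grids where some row is shorter than row 0 (rooster[r][c]).
def Pre_appels (rooster : List (List String)) : Prop :=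
  rooster ≠ [] ∧ ∀ rij ∈ rooster, (rooster.headD []).length ≤ rij.length
instance (rooster : List (List String)) : Decidable (Pre_appels rooster) := by
  unfold Pre_appels; infer_instance
def pvWitness_appels : List (List String) := [["a", " "], ["#", "a"]]
def Spec_appels (rooster : List (List String)) (out : List (List String)) : Prop := out = appels_alt rooster
instance (rooster : List (List String)) (out : List (List String)) : Decidable (Spec_appels rooster out) := by unfold Spec_appels; infer_instance

-- ===== CLAIM (what is proved, stated in full; the proofs are below) =====
def Claim_equal_appels : Prop := ∀ (rooster : List (List String)), Dom_appels rooster → Pre_appels rooster → Spec_appels rooster (appels rooster)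

-- ===== LEMMAS AND PROOFS =====

-- column c of the grid (out-of-range cells read as "")
def pvColl (L : List (List String)) (c : Nat) : List String :=
  L.map (fun rij => rij.getD c "")

-- the settled cell at row r, column c
def pvCell (L : List (List String)) (r c : Nat) : String :=
  if L.length - List.count "#" (pvColl L c) ≤ r then "#"
  else if L.length - (List.count "#" (pvColl L c) + List.count "a" (pvColl L c)) ≤ r then "a"
  else " "

-- the common normal form both ports are reduced to
def pvTarget (L : List (List String)) : List (List String) :=
  (List.range L.length).map (fun r =>
    (List.range (PySem.List.pyGetD L 0 []).length).map (fun c => pvCell L r c))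

theorem pv_count_le (l : List String) :
    List.count "a" l + List.count "#" l ≤ l.length := by
  induction l with
  | nil => simp
  | cons x xs ih =>
    simp only [List.count_cons, List.length_cons]
    by_cases h1 : x = "a" <;> by_cases h2 : x = "#" <;> simp [h1, h2] <;> omega

theorem pv_countfold (l : List String) (x y : Int) :
    l.foldl (fun (t : Int × Int) el =>
      if el = "a" then (t.1 + 1, t.2)
      else if el = "#" then (t.1, t.2 + 1)
      else t) (x, y)
    = (x + List.count "a" l, y + List.count "#" l) := by
  induction l generalizing x y with
  | nil => simp
  | cons e l ih =>
    simp only [List.foldl_cons, List.count_cons]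
    by_cases h1 : e = "a" <;> by_cases h2 : e = "#" <;> simp [h1, h2, ih] <;> omega

theorem pv_foldl_range_getD {α β : Type} (l : List α) (d : α) (f : β → α → β) (i : β) :
    (List.range l.length).foldl (fun acc k => f acc (l.getD k d)) i = l.foldl f i := by
  rw [← List.foldl_map (f := fun k => l.getD k d) (g := f)]
  congr 1
  apply List.ext_getElem
  · simp
  · intro j h1 h2
    simp [List.getD_eq_getElem?_getD, List.getElem?_eq_getElem h2]

theorem pv_map_range_congr {α : Type} (n : Nat) (f h : Nat → α)
    (hfh : ∀ i, i < n → f i = h i) :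
    (List.range n).map f = (List.range n).map h :=
  List.map_congr_left (fun i hi => hfh i (List.mem_range.mp hi))

theorem pv_set_map_range {α : Type} (n : Nat) (f : Nat → α) (p : Nat) (_hp : p < n) (v : α) :
    ((List.range n).map f).set p v
      = (List.range n).map (fun i => if i = p then v else f i) := by
  apply List.ext_getElem
  · simp
  · intro i h1 h2
    simp only [List.getElem_set, List.getElem_map, List.getElem_range]
    split_ifs <;> first | rfl | omega

-- the inner counting loop of A computes the two column counts
theorem pv_inner_count (L : List (List String)) (c : Nat) :
    (List.range L.length).foldl (fun (t : Int × Int) (r : Nat) =>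
        if (L.getD r []).getD c "" = "a" then (t.1 + 1, t.2)
        else if (L.getD r []).getD c "" = "#" then (t.1, t.2 + 1)
        else t) (0, 0)
    = ((List.count "a" (pvColl L c) : Int), (List.count "#" (pvColl L c) : Int)) := by
  rw [pv_foldl_range_getD L [] (fun (t : Int × Int) row =>
    if row.getD c "" = "a" then (t.1 + 1, t.2)
    else if row.getD c "" = "#" then (t.1, t.2 + 1)
    else t) (0, 0)]
  rw [← List.foldl_map (f := fun rij : List String => rij.getD c "")
    (g := fun (t : Int × Int) el =>
      if el = "a" then (t.1 + 1, t.2)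
      else if el = "#" then (t.1, t.2 + 1)
      else t)]
  rw [show L.map (fun rij => rij.getD c "") = pvColl L c from rfl, pv_countfold]
  simp

-- A's pair-of-lists accumulation is a pair of maps
theorem pv_counts_build {α : Type} (l : List α) (h1 h2 : α → Int) (acc1 acc2 : List Int) :
    l.foldl (fun (acc : List Int × List Int) c => (acc.1 ++ [h1 c], acc.2 ++ [h2 c])) (acc1, acc2)
    = (acc1 ++ l.map h1, acc2 ++ l.map h2) := by
  rw [PySem.List.foldl_prod_mk (f := fun a c => a ++ [h1 c]) (g := fun a c => a ++ [h2 c])]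
  rw [PySem.List.foldl_append_singleton_eq_map, PySem.List.foldl_append_singleton_eq_map]

-- reading row r of B's settled column
theorem pv_colOut_getD (n a g r : Nat) (hr : r < n) (h : a + g ≤ n) :
    (List.replicate (n - a - g) " " ++ List.replicate a "a" ++ List.replicate g "#").getD r " "
      = if n - g ≤ r then "#" else if n - (g + a) ≤ r then "a" else " " := by
  rw [List.getD_eq_getElem?_getD]
  by_cases h1 : r < n - a - g
  · rw [List.getElem?_append_left (by simp only [List.length_append, List.length_replicate]; omega),
      List.getElem?_append_left (by simp only [List.length_replicate]; omega)]
    rw [List.getElem?_replicate, if_pos h1, if_neg (by omega), if_neg (by omega)]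
    rfl
  · by_cases h2 : r < n - g
    · rw [List.getElem?_append_left (by simp only [List.length_append, List.length_replicate]; omega),
        List.getElem?_append_right (by simp only [List.length_replicate]; omega)]
      rw [List.length_replicate, List.getElem?_replicate, if_pos (by omega),
        if_neg (by omega), if_pos (by omega)]
      rfl
    · rw [List.getElem?_append_right (by simp only [List.length_append, List.length_replicate]; omega)]
      rw [List.length_append, List.length_replicate, List.length_replicate]
      rw [List.getElem?_replicate, if_pos (by omega), if_pos (by omega)]
      rfl

-- A's inner fill loop over one column, after k of its tela+telg iterations
theorem pv_innerfill (n m c a g : Nat) (hc : c < m) (hag : a + g ≤ n)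
    (F : Nat → Nat → String) :
    ∀ k : Nat, k ≤ g + a →
    (PySem.List.pyRange 0 (k : Int) 1).foldl (fun nw2 r =>
        PySem.List.pySetD nw2 ((n : Int) - 1 - r)
          (PySem.List.pySetD (PySem.List.pyGetD nw2 ((n : Int) - 1 - r) []) (c : Int)
            (if r < (g : Int) then "#" else "a")))
      ((List.range n).map (fun r => (List.range m).map (fun c' => F r c')))
    = (List.range n).map (fun r => (List.range m).map (fun c' =>
        if c' = c ∧ n - k ≤ r ∧ r < n then (if n - g ≤ r then "#" else "a") else F r c')) := by
  intro k
  induction k with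
  | zero =>
    intro _
    rw [show ((0 : Nat) : Int) = 0 from rfl, PySem.List.pyRange_one_eq_nil (by omega)]
    simp only [List.foldl_nil]
    refine pv_map_range_congr _ _ _ (fun r hr => ?_)
    refine pv_map_range_congr _ _ _ (fun c' _ => ?_)
    rw [if_neg (by omega)]
  | succ k ih =>
    intro hk1
    have hkn : k < n := by omega
    rw [show ((k + 1 : Nat) : Int) = (k : Int) + 1 by push_cast; ring]
    rw [PySem.List.pyRange_one_succ_right (by positivity), List.foldl_append, ih (by omega)]
    simp only [List.foldl_cons, List.foldl_nil]
    rw [show (n : Int) - 1 - (k : Int) = ((n - 1 - k : Nat) : Int) by omega]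
    simp only [PySem.List.pyGetD_natCast, PySem.List.pySetD_natCast]
    rw [PySem.List.getD_map_range _ _ _ _ (by omega)]
    rw [pv_set_map_range m _ c hc]
    rw [pv_set_map_range n _ (n - 1 - k) (by omega)]
    refine pv_map_range_congr _ _ _ (fun i hi => ?_)
    by_cases hiρ : i = n - 1 - k
    · rw [if_pos hiρ]
      subst hiρ
      refine pv_map_range_congr _ _ _ (fun c' _ => ?_)
      split_ifs <;> first | rfl | omega
    · rw [if_neg hiρ]
      refine pv_map_range_congr _ _ _ (fun c' _ => ?_)
      split_ifs <;> first | rfl | omega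

-- A's outer fill loop over the first M' columns
theorem pv_fill (n m : Nat) (A G : Nat → Nat) (hAG : ∀ c, A c + G c ≤ n) :
    ∀ M' : Nat, M' ≤ m →
    (List.range M').foldl (fun nw (k : Nat) =>
        (PySem.List.pyRange 0 ((G k : Int) + (A k : Int)) 1).foldl (fun nw2 r =>
            PySem.List.pySetD nw2 ((n : Int) - 1 - r)
              (PySem.List.pySetD (PySem.List.pyGetD nw2 ((n : Int) - 1 - r) []) (k : Int)
                (if r < (G k : Int) then "#" else "a"))) nw)
      ((List.range n).map (fun _ => (List.range m).map (fun _ => " ")))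
    = (List.range n).map (fun r => (List.range m).map (fun c =>
        if c < M' then (if n - G c ≤ r then "#" else if n - (G c + A c) ≤ r then "a" else " ")
        else " ")) := by
  intro M'
  induction M' with
  | zero =>
    intro _
    simp only [List.range_zero, List.foldl_nil]
    refine pv_map_range_congr _ _ _ (fun r hr => ?_)
    refine pv_map_range_congr _ _ _ (fun c _ => ?_)
    rw [if_neg (by omega)]
  | succ M ih =>
    intro h1
    rw [List.range_succ, List.foldl_append, ih (by omega)]
    simp only [List.foldl_cons, List.foldl_nil]
    rw [show (G M : Int) + (A M : Int) = ((G M + A M : Nat) : Int) by push_cast; ring]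
    rw [pv_innerfill n m M (A M) (G M) (by omega) (hAG M) _ (G M + A M) (le_refl _)]
    refine pv_map_range_congr _ _ _ (fun r hr => ?_)
    refine pv_map_range_congr _ _ _ (fun c _ => ?_)
    by_cases hcM : c = M
    · subst hcM
      split_ifs <;> first | rfl | omega
    · split_ifs <;> first | rfl | omega

theorem pv_A (L : List (List String)) : appels L = pvTarget L := by
  have hAG : ∀ c : Nat, List.count "a" (pvColl L c) + List.count "#" (pvColl L c) ≤ L.length := by
    intro c
    have h := pv_count_le (pvColl L c)
    have hl : (pvColl L c).length = L.length := by simp [pvColl]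
    omega
  simp only [appels, PySem.List.len_eq, PySem.List.pyRange_zero_nat, List.foldl_map,
    PySem.List.pyGetD_natCast, pv_inner_count, pv_counts_build, List.nil_append,
    PySem.List.foldl_append_singleton_eq_map]
  rw [PySem.List.foldl_congr_mem _ _
    (fun nw (k : Nat) =>
      (PySem.List.pyRange 0 ((List.count "#" (pvColl L k) : Int) + (List.count "a" (pvColl L k) : Int)) 1).foldl
        (fun nw2 r =>
          PySem.List.pySetD nw2 ((L.length : Int) - 1 - r)
            (PySem.List.pySetD (PySem.List.pyGetD nw2 ((L.length : Int) - 1 - r) []) (k : Int)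
              (if r < (List.count "#" (pvColl L k) : Int) then "#" else "a"))) nw)
    _ ?_]
  · rw [pv_fill L.length (PySem.List.pyGetD L 0 []).length
      (fun c => List.count "a" (pvColl L c)) (fun c => List.count "#" (pvColl L c)) hAG
      (PySem.List.pyGetD L 0 []).length (le_refl _)]
    simp only [pvTarget, pvCell]
    refine pv_map_range_congr _ _ _ (fun r hr => ?_)
    refine pv_map_range_congr _ _ _ (fun c hc => ?_)
    rw [if_pos hc]
  · intro nw k hk
    have hk' : k < (PySem.List.pyGetD L 0 []).length := List.mem_range.mp hk
    rw [PySem.List.getD_map_range _ _ _ _ hk', PySem.List.getD_map_range _ _ _ _ hk']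

theorem pv_B (L : List (List String)) : appels_alt L = pvTarget L := by
  simp only [appels_alt, PySem.List.len_eq, PySem.List.pyRange_zero_nat, List.map_map,
    Function.comp_def, PySem.List.pyGetD_natCast, PySem.List.count_eq, pvTarget, pvCell]
  refine pv_map_range_congr _ _ _ (fun r hr => ?_)
  refine pv_map_range_congr _ _ _ (fun c hc => ?_)
  rw [PySem.List.getD_map_range _ _ _ _ hc]
  rw [show L.map (fun rij => rij.getD c "") = pvColl L c from rfl]
  have h := pv_count_le (pvColl L c)
  have hl : (pvColl L c).length = L.length := by simp [pvColl]
  rw [show ((L.length : Int) - (List.count "a" (pvColl L c) : Int)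
      - (List.count "#" (pvColl L c) : Int)).toNat
      = L.length - List.count "a" (pvColl L c) - List.count "#" (pvColl L c) by omega]
  simp only [Int.toNat_natCast]
  rw [pv_colOut_getD L.length (List.count "a" (pvColl L c)) (List.count "#" (pvColl L c)) r hr
    (by omega)]

-- ===== VERDICT (by name: the statement is the Claim_ definition above) =====
theorem appels_spec : Claim_equal_appels := by
  intro rooster _hdom _hpre
  unfold Spec_appels
  rw [pv_A, pv_B]
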